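-- pv_equiv track=rewrite | github.com/RamadanMufian/SISTEM-SCRAPING-DATA-DARI-MEDIA-SOSIAL-TIKTOK-DENGAN-MENGGUNAKAN-DAN-MODEL-BERBASIS-TRANSFORMER | regions.py | get_island_from_province
-- ===== SOURCE A (Python) =====
-- INDONESIAN_REGIONS = {
--     "pulau": {
--         "sumatra": ["ACEH", "SUMATERA UTARA", "SUMATERA BARAT", "RIAU", "JAMBI",
--                    "SUMATERA SELATAN", "BENGKULU", "LAMPUNG", "KEP. BANGKA BELITUNG",
--                    "KEP. RIAU"],
--         "jawa": ["DKI JAKARTA", "JAWA BARAT", "JAWA TENGAH", "DI YOGYAKARTA",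
--                 "JAWA TIMUR", "BANTEN"],
--         "kalimantan": ["KALIMANTAN BARAT", "KALIMANTAN TENGAH", "KALIMANTAN SELATAN",
--                       "KALIMANTAN TIMUR", "KALIMANTAN UTARA"],
--         "sulawesi": ["SULAWESI UTARA", "SULAWESI TENGAH", "SULAWESI SELATAN",
--                     "SULAWESI TENGGARA", "GORONTALO", "SULAWESI BARAT"],
--         "bali_nusa": ["BALI", "NUSA TENGGARA BARAT", "NUSA TENGGARA TIMUR"],
--         "maluku": ["MALUKU", "MALUKU UTARA"],
--         "papua": ["PAPUA", "PAPUA BARAT", "PAPUA TENGAH", "PAPUA PEGUNUNGAN",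
--                  "PAPUA SELATAN", "PAPUA BARAT DAYA"]
--     },
--
--     "provinsi": {
--         "11": {"nama": "ACEH", "ibu_kota": "Banda Aceh", "lat": 5.55, "lon": 95.32},
--         "12": {"nama": "SUMATERA UTARA", "ibu_kota": "Medan", "lat": 3.58, "lon": 98.67},
--         "13": {"nama": "SUMATERA BARAT", "ibu_kota": "Padang", "lat": -0.95, "lon": 100.35},
--         "14": {"nama": "RIAU", "ibu_kota": "Pekanbaru", "lat": 0.53, "lon": 101.45},
--         "15": {"nama": "JAMBI", "ibu_kota": "Jambi", "lat": -1.59, "lon": 103.61},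
--         "16": {"nama": "SUMATERA SELATAN", "ibu_kota": "Palembang", "lat": -2.99, "lon": 104.76},
--         "17": {"nama": "BENGKULU", "ibu_kota": "Bengkulu", "lat": -3.80, "lon": 102.26},
--         "18": {"nama": "LAMPUNG", "ibu_kota": "Bandar Lampung", "lat": -5.45, "lon": 105.27},
--         "19": {"nama": "KEP. BANGKA BELITUNG", "ibu_kota": "Pangkal Pinang", "lat": -2.13, "lon": 106.11},
--         "21": {"nama": "KEP. RIAU", "ibu_kota": "Tanjung Pinang", "lat": 0.92, "lon": 104.45},
--         "31": {"nama": "DKI JAKARTA", "ibu_kota": "Jakarta", "lat": -6.21, "lon": 106.85},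
--         "32": {"nama": "JAWA BARAT", "ibu_kota": "Bandung", "lat": -6.91, "lon": 107.61},
--         "33": {"nama": "JAWA TENGAH", "ibu_kota": "Semarang", "lat": -7.01, "lon": 110.44},
--         "34": {"nama": "DI YOGYAKARTA", "ibu_kota": "Yogyakarta", "lat": -7.80, "lon": 110.36},
--         "35": {"nama": "JAWA TIMUR", "ibu_kota": "Surabaya", "lat": -7.26, "lon": 112.75},
--         "36": {"nama": "BANTEN", "ibu_kota": "Serang", "lat": -6.12, "lon": 106.15},
--         "51": {"nama": "BALI", "ibu_kota": "Denpasar", "lat": -8.65, "lon": 115.22},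
--         "52": {"nama": "NUSA TENGGARA BARAT", "ibu_kota": "Mataram", "lat": -8.58, "lon": 116.12},
--         "53": {"nama": "NUSA TENGGARA TIMUR", "ibu_kota": "Kupang", "lat": -10.18, "lon": 123.58},
--         "61": {"nama": "KALIMANTAN BARAT", "ibu_kota": "Pontianak", "lat": -0.02, "lon": 109.34},
--         "62": {"nama": "KALIMANTAN TENGAH", "ibu_kota": "Palangka Raya", "lat": -2.21, "lon": 113.92},
--         "63": {"nama": "KALIMANTAN SELATAN", "ibu_kota": "Banjarmasin", "lat": -3.32, "lon": 114.59},
--         "64": {"nama": "KALIMANTAN TIMUR", "ibu_kota": "Samarinda", "lat": -0.50, "lon": 117.15},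
--         "65": {"nama": "KALIMANTAN UTARA", "ibu_kota": "Tanjung Selor", "lat": 2.84, "lon": 117.37},
--         "71": {"nama": "SULAWESI UTARA", "ibu_kota": "Manado", "lat": 1.49, "lon": 124.84},
--         "72": {"nama": "SULAWESI TENGAH", "ibu_kota": "Palu", "lat": -0.90, "lon": 119.86},
--         "73": {"nama": "SULAWESI SELATAN", "ibu_kota": "Makassar", "lat": -5.15, "lon": 119.43},
--         "74": {"nama": "SULAWESI TENGGARA", "ibu_kota": "Kendari", "lat": -3.99, "lon": 122.51},
--         "75": {"nama": "GORONTALO", "ibu_kota": "Gorontalo", "lat": 0.54, "lon": 123.06},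
--         "76": {"nama": "SULAWESI BARAT", "ibu_kota": "Mamuju", "lat": -2.68, "lon": 118.89},
--         "81": {"nama": "MALUKU", "ibu_kota": "Ambon", "lat": -3.65, "lon": 128.19},
--         "82": {"nama": "MALUKU UTARA", "ibu_kota": "Sofifi", "lat": 0.72, "lon": 127.57},
--         "91": {"nama": "PAPUA", "ibu_kota": "Jayapura", "lat": -2.53, "lon": 140.72},
--         "92": {"nama": "PAPUA BARAT", "ibu_kota": "Manokwari", "lat": -0.86, "lon": 134.06},
--         "93": {"nama": "PAPUA TENGAH", "ibu_kota": "Nabire", "lat": -3.37, "lon": 135.50},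
--         "94": {"nama": "PAPUA PEGUNUNGAN", "ibu_kota": "Wamena", "lat": -4.10, "lon": 138.95},
--         "95": {"nama": "PAPUA SELATAN", "ibu_kota": "Merauke", "lat": -8.50, "lon": 140.40},
--         "96": {"nama": "PAPUA BARAT DAYA", "ibu_kota": "Sorong", "lat": -0.86, "lon": 131.25}
--     },
--
--     "kota_besar": [
--         {"nama": "Jakarta", "provinsi": "DKI JAKARTA", "lat": -6.21, "lon": 106.85, "penduduk": 10562000},
--         {"nama": "Surabaya", "provinsi": "JAWA TIMUR", "lat": -7.26, "lon": 112.75, "penduduk": 2985000},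
--         {"nama": "Bandung", "provinsi": "JAWA BARAT", "lat": -6.91, "lon": 107.61, "penduduk": 2475000},
--         {"nama": "Medan", "provinsi": "SUMATERA UTARA", "lat": 3.58, "lon": 98.67, "penduduk": 2210000},
--         {"nama": "Semarang", "provinsi": "JAWA TENGAH", "lat": -7.01, "lon": 110.44, "penduduk": 1680000},
--         {"nama": "Makassar", "provinsi": "SULAWESI SELATAN", "lat": -5.15, "lon": 119.43, "penduduk": 1475000},
--         {"nama": "Palembang", "provinsi": "SUMATERA SELATAN", "lat": -2.99, "lon": 104.76, "penduduk": 1660000},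
--         {"nama": "Batam", "provinsi": "KEP. RIAU", "lat": 1.13, "lon": 104.05, "penduduk": 1200000},
--         {"nama": "Pekanbaru", "provinsi": "RIAU", "lat": 0.53, "lon": 101.45, "penduduk": 1090000},
--         {"nama": "Denpasar", "provinsi": "BALI", "lat": -8.65, "lon": 115.22, "penduduk": 897000}
--     ]
-- }
--
-- def get_island_from_province(province_name):
--     """Dapatkan pulau dari nama provinsi"""
--     province_upper = province_name.upper()
--
--     for island, provinces in INDONESIAN_REGIONS["pulau"].items():
--         if province_upper in [p.upper() for p in provinces]:
--             island_names = {
--                 "sumatra": "Sumatra",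
--                 "jawa": "Jawa",
--                 "kalimantan": "Kalimantan",
--                 "sulawesi": "Sulawesi",
--                 "bali_nusa": "Bali & Nusa Tenggara",
--                 "maluku": "Maluku",
--                 "papua": "Papua"
--             }
--             return island_names.get(island, island)
--
--     return "Lainnya"
-- ===== SOURCE B (Python) =====
-- # Data kept as one delimited string per island; a flat province -> island dict is
-- # built once at import by splitting them, so each call is a single lookup.
-- _ISLAND_TABLE = [
--     ("Sumatra", "ACEH;SUMATERA UTARA;SUMATERA BARAT;RIAU;JAMBI;SUMATERA SELATAN;BENGKULU;LAMPUNG;KEP. BANGKA BELITUNG;KEP. RIAU"),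
--     ("Jawa", "DKI JAKARTA;JAWA BARAT;JAWA TENGAH;DI YOGYAKARTA;JAWA TIMUR;BANTEN"),
--     ("Kalimantan", "KALIMANTAN BARAT;KALIMANTAN TENGAH;KALIMANTAN SELATAN;KALIMANTAN TIMUR;KALIMANTAN UTARA"),
--     ("Sulawesi", "SULAWESI UTARA;SULAWESI TENGAH;SULAWESI SELATAN;SULAWESI TENGGARA;GORONTALO;SULAWESI BARAT"),
--     ("Bali & Nusa Tenggara", "BALI;NUSA TENGGARA BARAT;NUSA TENGGARA TIMUR"),
--     ("Maluku", "MALUKU;MALUKU UTARA"),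
--     ("Papua", "PAPUA;PAPUA BARAT;PAPUA TENGAH;PAPUA PEGUNUNGAN;PAPUA SELATAN;PAPUA BARAT DAYA"),
-- ]
--
-- PROVINCE_TO_ISLAND = {}
-- for _display, _blob in _ISLAND_TABLE:
--     for _p in _blob.split(";"):
--         PROVINCE_TO_ISLAND[_p] = _display
--
-- def get_island_from_province(province_name):
--     """Dapatkan pulau dari nama provinsi"""
--     return PROVINCE_TO_ISLAND.get(province_name.upper(), "Lainnya")
-- ===== Notes on version B (the rewrite author's own statement) =====
-- stated objective: simpler
-- what changed: A scans the islands on every call, rebuilding an uppercased province list per island and a display-name dict on a hit; B stores each island's provinces as one delimited string, splits them once at import into a flat province-to-island dict, and each call is a single dict lookup with 'Lainnya' as default.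
import Mathlib
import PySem

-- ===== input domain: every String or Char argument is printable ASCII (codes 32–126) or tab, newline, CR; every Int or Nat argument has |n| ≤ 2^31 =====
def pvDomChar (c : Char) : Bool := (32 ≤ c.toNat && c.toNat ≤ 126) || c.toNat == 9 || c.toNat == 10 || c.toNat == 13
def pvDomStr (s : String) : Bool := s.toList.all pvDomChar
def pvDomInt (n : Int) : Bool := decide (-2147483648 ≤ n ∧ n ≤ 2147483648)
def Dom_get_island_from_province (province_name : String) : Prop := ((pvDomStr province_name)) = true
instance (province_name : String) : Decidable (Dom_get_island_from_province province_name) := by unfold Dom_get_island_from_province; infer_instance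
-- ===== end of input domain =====

-- B keeps each island's provinces as one delimited string and builds a flat
-- province → island dict once by splitting them; each call is one lookup
-- instead of A's per-call scan over islands. Return values are identical.

-- ===== PORT A =====
-- INDONESIAN_REGIONS["pulau"] as an insertion-ordered association list
def pvPulau : List (String × List String) :=
  [("sumatra", ["ACEH", "SUMATERA UTARA", "SUMATERA BARAT", "RIAU", "JAMBI",
                "SUMATERA SELATAN", "BENGKULU", "LAMPUNG", "KEP. BANGKA BELITUNG",
                "KEP. RIAU"]),
   ("jawa", ["DKI JAKARTA", "JAWA BARAT", "JAWA TENGAH", "DI YOGYAKARTA",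
             "JAWA TIMUR", "BANTEN"]),
   ("kalimantan", ["KALIMANTAN BARAT", "KALIMANTAN TENGAH", "KALIMANTAN SELATAN",
                   "KALIMANTAN TIMUR", "KALIMANTAN UTARA"]),
   ("sulawesi", ["SULAWESI UTARA", "SULAWESI TENGAH", "SULAWESI SELATAN",
                 "SULAWESI TENGGARA", "GORONTALO", "SULAWESI BARAT"]),
   ("bali_nusa", ["BALI", "NUSA TENGGARA BARAT", "NUSA TENGGARA TIMUR"]),
   ("maluku", ["MALUKU", "MALUKU UTARA"]),
   ("papua", ["PAPUA", "PAPUA BARAT", "PAPUA TENGAH", "PAPUA PEGUNUNGAN",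
              "PAPUA SELATAN", "PAPUA BARAT DAYA"])]

-- the island_names dict literal A builds inside the loop (distinct keys)
def pvIslandNamesA : PySem.Dict String String :=
  PySem.Dict.ofList
    [("sumatra", "Sumatra"), ("jawa", "Jawa"), ("kalimantan", "Kalimantan"),
     ("sulawesi", "Sulawesi"), ("bali_nusa", "Bali & Nusa Tenggara"),
     ("maluku", "Maluku"), ("papua", "Papua")]

-- the 'for island, provinces in …: if province_upper in [p.upper() for p in provinces]: return …' loop
def pvLoopA (u : String) : List (String × List String) → String
  | [] => "Lainnya"
  | (island, provinces) :: rest =>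
      if (provinces.map PySem.Str.upper).contains u then
        pvIslandNamesA.getD island island
      else pvLoopA u rest

def get_island_from_province (province_name : String) : String :=
  pvLoopA (PySem.Str.upper province_name) pvPulau

-- ===== PORT B =====
-- _ISLAND_TABLE: display name × ';'-joined province blob
def pvIslandTableB : List (String × String) :=
  [("Sumatra", "ACEH;SUMATERA UTARA;SUMATERA BARAT;RIAU;JAMBI;SUMATERA SELATAN;BENGKULU;LAMPUNG;KEP. BANGKA BELITUNG;KEP. RIAU"),
   ("Jawa", "DKI JAKARTA;JAWA BARAT;JAWA TENGAH;DI YOGYAKARTA;JAWA TIMUR;BANTEN"),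
   ("Kalimantan", "KALIMANTAN BARAT;KALIMANTAN TENGAH;KALIMANTAN SELATAN;KALIMANTAN TIMUR;KALIMANTAN UTARA"),
   ("Sulawesi", "SULAWESI UTARA;SULAWESI TENGAH;SULAWESI SELATAN;SULAWESI TENGGARA;GORONTALO;SULAWESI BARAT"),
   ("Bali & Nusa Tenggara", "BALI;NUSA TENGGARA BARAT;NUSA TENGGARA TIMUR"),
   ("Maluku", "MALUKU;MALUKU UTARA"),
   ("Papua", "PAPUA;PAPUA BARAT;PAPUA TENGAH;PAPUA PEGUNUNGAN;PAPUA SELATAN;PAPUA BARAT DAYA")]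

-- the import-time double loop: for display, blob: for p in blob.split(";"): d[p] = display
-- (split? is the exact s.split(sep); sep is the literal ";" ≠ "", so the none case never fires)
def pvProvinceToIslandB : PySem.Dict String String :=
  pvIslandTableB.foldl
    (fun d e => ((PySem.Str.split? e.2 ";").getD []).foldl (fun d p => d.insert p e.1) d)
    PySem.Dict.empty

def get_island_from_province_alt (province_name : String) : String :=
  pvProvinceToIslandB.getD (PySem.Str.upper province_name) "Lainnya"

-- ===== PRECONDITION & SPEC =====
def Spec_get_island_from_province (province_name : String) (out : String) : Prop := out = get_island_from_province_alt province_name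
instance (province_name : String) (out : String) : Decidable (Spec_get_island_from_province province_name out) := by unfold Spec_get_island_from_province; infer_instance

-- ===== CLAIM (what is proved, stated in full; the proofs are below) =====
def Claim_equal_get_island_from_province : Prop := ∀ (province_name : String), Dom_get_island_from_province province_name → Spec_get_island_from_province province_name (get_island_from_province province_name)

-- ===== LEMMAS AND PROOFS =====

-- one island block of a flattened pair list: lookup in it hits iff u is among its keys
lemma pv_get?_mk_block (ps : List String) (nm : String) (rest : List (String × String)) (u : String) :
    (PySem.Dict.mk ((ps.map (fun p => (PySem.Str.upper p, nm))) ++ rest)).get? u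
      = if (ps.map PySem.Str.upper).contains u then some nm
        else (PySem.Dict.mk rest).get? u := by
  induction ps with
  | nil => simp
  | cons p ps ih =>
      simp only [List.map_cons, List.cons_append, PySem.Dict.get?_mk_cons, List.contains_cons, ih]
      by_cases h : PySem.Str.upper p = u
      · subst h; simp
      · simp [h, Ne.symm h]

-- A's loop over any island list equals first-match lookup in the flattened pairs
lemma pv_loop_eq_flat (islands : List (String × List String)) (u : String) :
    pvLoopA u islands
      = ((PySem.Dict.mk (islands.flatMap (fun kp =>
            kp.2.map (fun p => (PySem.Str.upper p, pvIslandNamesA.getD kp.1 kp.1))))).get? u).getD "Lainnya" := by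
  induction islands with
  | nil => simp [pvLoopA, PySem.Dict.get?]
  | cons kp rest ih =>
      obtain ⟨island, provinces⟩ := kp
      simp only [pvLoopA, List.flatMap_cons, pv_get?_mk_block]
      by_cases h : (provinces.map PySem.Str.upper).contains u = true
      · rw [if_pos h, if_pos h, Option.getD_some]
      · rw [if_neg h, if_neg h]; exact ih

-- B's fold-built dict is, as a value, exactly A's flattened pair list (closed computation)
set_option maxRecDepth 10000 in
lemma pv_dictB_eq_flatA :
    pvProvinceToIslandB
      = PySem.Dict.mk (pvPulau.flatMap (fun kp =>
          kp.2.map (fun p => (PySem.Str.upper p, pvIslandNamesA.getD kp.1 kp.1)))) := by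
  decide

-- ===== VERDICT (by name: the statement is the Claim_ definition above) =====
theorem get_island_from_province_spec : Claim_equal_get_island_from_province := by
  intro s _
  unfold Spec_get_island_from_province get_island_from_province get_island_from_province_alt
  rw [pv_loop_eq_flat, PySem.Dict.getD_eq_get?_getD, pv_dictB_eq_flatA]
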